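-- pv_equiv track=rewrite | github.com/ahmadeburham/the-finall | debug_full_id_pipeline.py | sequential_decision
-- ===== SOURCE A (Python) =====
-- from typing import Dict, List, Tuple
--
-- def sequential_decision(logs: List[Dict]) -> Tuple[bool, List[Dict]]:
--     votes = []
--     used = []
--
--     for idx, log in enumerate(logs):
--         passed = bool(log.get("passed", False))
--         votes.append(passed)
--         used.append(log)
--
--         if idx == 1 and len(votes) == 2 and votes[0] and votes[1]:
--             return True, used
--
--         remaining = len(logs) - len(votes)
--         true_count = sum(1 for x in votes if x)
--         false_count = len(votes) - true_count
--
--         if true_count > false_count + remaining: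
--             return True, used
--         if false_count >= true_count + remaining:
--             return False, used
--
--     true_count = sum(1 for x in votes if x)
--     false_count = len(votes) - true_count
--     return true_count > false_count, used
-- ===== SOURCE B (Python) =====
-- from typing import Dict, List, Tuple
--
-- def sequential_decision(logs: List[Dict]) -> Tuple[bool, List[Dict]]:
--     n = len(logs)
--     t = 0  # incremental count of True votes
--     for i, log in enumerate(logs):
--         if bool(log.get("passed", False)):
--             t += 1
--         k = i + 1          # votes seen so far
--         f = k - t          # False votes
--         rem = n - k        # votes not yet seen
--         if i == 1 and t == 2:
--             return True, logs[:2]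
--         if t > f + rem:
--             return True, logs[:k]
--         if f >= t + rem:
--             return False, logs[:k]
--     return t > n - t, list(logs)
-- ===== Notes on version B (the rewrite author's own statement) =====
-- stated objective: alternative
-- what changed: B keeps incremental true/false counters and returns prefixes by slicing, instead of re-summing the whole votes list and re-appending to votes/used on every iteration as A does.
import Mathlib
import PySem

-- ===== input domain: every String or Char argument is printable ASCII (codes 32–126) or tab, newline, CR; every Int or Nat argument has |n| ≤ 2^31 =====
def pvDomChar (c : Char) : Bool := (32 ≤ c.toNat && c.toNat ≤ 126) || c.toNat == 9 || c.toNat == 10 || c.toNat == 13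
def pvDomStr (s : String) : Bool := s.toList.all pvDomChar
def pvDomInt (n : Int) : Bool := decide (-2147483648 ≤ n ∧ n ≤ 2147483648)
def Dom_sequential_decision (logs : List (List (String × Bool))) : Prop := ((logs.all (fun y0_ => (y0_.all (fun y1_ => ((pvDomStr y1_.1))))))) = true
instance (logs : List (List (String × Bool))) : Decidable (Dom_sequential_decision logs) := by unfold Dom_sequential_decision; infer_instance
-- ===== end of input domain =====

-- B keeps incremental true/false counters and returns prefixes by slicing, instead of
-- re-summing the votes list and re-appending to votes/used each iteration.

-- ===== PORT A =====
-- bool(log.get("passed", False)) — dict lookup with default; values are Bool so bool() is identity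
def pvPassed (log : List (String × Bool)) : Bool := PySem.Dict.getD (PySem.Dict.mk log) "passed" false

-- the for-loop of A: recursion over the remaining logs, carrying idx, votes, used
def pvALoop (logs : List (List (String × Bool))) :
    List (List (String × Bool)) → Nat → List Bool → List (List (String × Bool)) →
    Bool × (List (List (String × Bool)))
  | [], _, votes, used =>
      -- after the loop: true_count > false_count
      let tc := votes.countP (fun x => x)
      let fc := votes.length - tc
      (decide (tc > fc), used)
  | log :: rest, idx, votes, used =>
      let passed := pvPassed log
      let votes := votes ++ [passed]
      let used := used ++ [log]
      -- votes[0] and votes[1]: in range since len(votes) == 2 is checked first (getD is exact here)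
      if idx = 1 ∧ votes.length = 2 ∧ votes.getD 0 false = true ∧ votes.getD 1 false = true then
        (true, used)
      else
        let remaining := logs.length - votes.length
        let tc := votes.countP (fun x => x)
        let fc := votes.length - tc
        if tc > fc + remaining then (true, used)
        else if fc ≥ tc + remaining then (false, used)
        else pvALoop logs rest (idx + 1) votes used

def sequential_decision (logs : List (List (String × Bool))) : Bool × (List (List (String × Bool))) :=
  pvALoop logs logs 0 [] []

-- ===== PORT B =====
-- the for-loop of B: only the index i and the running True-count t are carried
def pvBLoop (logs : List (List (String × Bool))) :
    List (List (String × Bool)) → Nat → Nat → Bool × (List (List (String × Bool)))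
  | [], _, t => (decide (t > logs.length - t), logs)
  | log :: rest, i, t =>
      let t := if pvPassed log then t + 1 else t
      let k := i + 1
      let f := k - t
      let rem := logs.length - k
      if i = 1 ∧ t = 2 then (true, logs.take 2)          -- logs[:2]
      else if t > f + rem then (true, logs.take k)       -- logs[:k], k ≥ 0: take is exact
      else if f ≥ t + rem then (false, logs.take k)
      else pvBLoop logs rest (i + 1) t

def sequential_decision_alt (logs : List (List (String × Bool))) : Bool × (List (List (String × Bool))) :=
  pvBLoop logs logs 0 0

-- ===== PRECONDITION & SPEC =====
def Spec_sequential_decision (logs : List (List (String × Bool))) (out : Bool × (List (List (String × Bool)))) : Prop := out = sequential_decision_alt logs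
instance (logs : List (List (String × Bool))) (out : Bool × (List (List (String × Bool)))) : Decidable (Spec_sequential_decision logs out) := by unfold Spec_sequential_decision; infer_instance

-- ===== CLAIM (what is proved, stated in full; the proofs are below) =====
def Claim_equal_sequential_decision : Prop := ∀ (logs : List (List (String × Bool))), Dom_sequential_decision logs → Spec_sequential_decision logs (sequential_decision logs)

-- ===== LEMMAS AND PROOFS =====

-- for a 2-element vote list, "votes[0] and votes[1]" ↔ "both of the 2 votes are True"
theorem pvTwoCond (vs : List Bool) (h : vs.length = 2) :
    (vs.getD 0 false = true ∧ vs.getD 1 false = true) ↔ vs.countP (fun x => x) = 2 := by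
  match vs, h with
  | [a, b], _ => cases a <;> cases b <;> simp [List.countP, List.countP.go]


theorem pvLoop_eq (logs : List (List (String × Bool))) :
    ∀ (rest : List (List (String × Bool))) (i : Nat),
      logs.drop i = rest → i ≤ logs.length →
      pvALoop logs rest i (((logs.take i).map pvPassed)) (logs.take i)
        = pvBLoop logs rest i (((logs.take i).map pvPassed).countP (fun x => x)) := by
  intro rest
  induction rest with
  | nil =>
    intro i hd hi
    have hlen : i = logs.length := le_antisymm hi (by
      have h2 := congrArg List.length hd; simp at h2; omega)
    subst hlen
    simp [pvALoop, pvBLoop]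
  | cons log rest' ih =>
    intro i hd hi
    have hi' : i < logs.length := by
      by_contra h
      have : logs.drop i = [] := List.drop_eq_nil_of_le (by omega)
      rw [hd] at this; exact List.cons_ne_nil _ _ this
    have hget : logs[i]? = some log := by
      have h0 : (logs.drop i)[0]? = some log := by rw [hd]; rfl
      simpa using h0
    have htake : logs.take (i + 1) = logs.take i ++ [log] := by
      rw [List.take_add_one, hget]; rfl
    have hdrop' : logs.drop (i + 1) = rest' := by
      have h2 : logs.drop (i + 1) = (logs.drop i).drop 1 := by
        rw [List.drop_drop]
      rw [h2, hd]; rfl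
    have hvlen : ((logs.take i).map pvPassed).length = i := by
      rw [List.length_map, List.length_take]; omega
    set votes := (logs.take i).map pvPassed with hv
    set t := votes.countP (fun x => x) with ht
    have hvotes' : (logs.take (i + 1)).map pvPassed = votes ++ [pvPassed log] := by
      rw [htake, List.map_append]; rfl
    have hcount' : (votes ++ [pvPassed log]).countP (fun x => x)
        = (if pvPassed log then t + 1 else t) := by
      cases h : pvPassed log <;> simp [List.countP_append, ht]
    show pvALoop logs (log :: rest') i votes (logs.take i) = pvBLoop logs (log :: rest') i t
    rw [pvALoop, pvBLoop]
    simp only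
    have hlen' : (votes ++ [pvPassed log]).length = i + 1 := by
      simp [hvlen]
    by_cases hc1 : i = 1 ∧ (if pvPassed log then t + 1 else t) = 2
    · obtain ⟨h1, h2⟩ := hc1
      have hA : i = 1 ∧ (votes ++ [pvPassed log]).length = 2 ∧
          (votes ++ [pvPassed log]).getD 0 false = true ∧
          (votes ++ [pvPassed log]).getD 1 false = true :=
        ⟨h1, by simp [hlen', h1],
         (pvTwoCond (votes ++ [pvPassed log]) (by simp [hlen', h1])).mpr
           (by rw [hcount']; exact h2)⟩
      rw [if_pos hA, if_pos ⟨h1, h2⟩]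
      rw [← htake, h1]
    · have hA : ¬ (i = 1 ∧ (votes ++ [pvPassed log]).length = 2 ∧
          (votes ++ [pvPassed log]).getD 0 false = true ∧
          (votes ++ [pvPassed log]).getD 1 false = true) := by
        rintro ⟨h1, h2, h3, h4⟩
        exact hc1 ⟨h1, by rw [← hcount']; exact (pvTwoCond _ h2).mp ⟨h3, h4⟩⟩
      rw [if_neg hA, if_neg hc1]
      simp only [hcount', hlen']
      by_cases hc2 : (if pvPassed log then t + 1 else t) >
          (i + 1 - (if pvPassed log then t + 1 else t)) + (logs.length - (i + 1))
      · rw [if_pos hc2, if_pos hc2, ← htake]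
      · rw [if_neg hc2, if_neg hc2]
        by_cases hc3 : (i + 1 - (if pvPassed log then t + 1 else t)) ≥
            (if pvPassed log then t + 1 else t) + (logs.length - (i + 1))
        · rw [if_pos hc3, if_pos hc3, ← htake]
        · rw [if_neg hc3, if_neg hc3]
          calc pvALoop logs rest' (i + 1) (votes ++ [pvPassed log]) (logs.take i ++ [log])
              = pvALoop logs rest' (i + 1) ((logs.take (i+1)).map pvPassed) (logs.take (i+1)) := by
                rw [hvotes', htake]
            _ = pvBLoop logs rest' (i + 1) (((logs.take (i+1)).map pvPassed).countP (fun x => x)) := ih (i+1) hdrop' hi'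
            _ = pvBLoop logs rest' (i + 1) (if pvPassed log then t + 1 else t) := by
                rw [hvotes', hcount']

theorem sequential_decision_spec : Claim_equal_sequential_decision := by
  intro logs _
  unfold Spec_sequential_decision sequential_decision sequential_decision_alt
  have h := pvLoop_eq logs logs 0 rfl (Nat.zero_le _)
  simpa using h
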